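-- pv_equiv track=rewrite | github.com/DHANYASREE-KG/CODING-CHALLENGES | Day-6.py | minDaysToBurnForest
-- ===== SOURCE A (Python) =====
-- def minDaysToBurnForest(forest):
--     n = len(forest)
--     m = len(forest[0])
--     days = 0
--
--     while True:
--         # list to store which trees will catch fire today
--         new_fire = []
--
--         for i in range(n):
--             for j in range(m):
--                 if forest[i][j] == 2:   # burning tree
--                     # check up
--                     if i > 0 and forest[i-1][j] == 1:
--                         new_fire.append((i-1, j))
--                     # check down
--                     if i < n-1 and forest[i+1][j] == 1:
--                         new_fire.append((i+1, j))
--                     # check left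
--                     if j > 0 and forest[i][j-1] == 1:
--                         new_fire.append((i, j-1))
--                     # check right
--                     if j < m-1 and forest[i][j+1] == 1:
--                         new_fire.append((i, j+1))
--
--         # if no new fire today → stop
--         if not new_fire:
--             break
--
--         # burn the new trees
--         for x, y in new_fire:
--             forest[x][y] = 2
--
--         days += 1   # one day passed
--
--     # check if any tree left unburned
--     for row in forest:
--         if 1 in row:
--             return -1
--     return days
-- ===== SOURCE B (Python) =====
-- # Multi-source BFS by levels: burned-cell set + frontier list instead of
-- # re-scanning and mutating the whole grid every day (A mutates `forest`
-- # in place; B does not — the equivalence claimed is about the return value).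
-- def minDaysToBurnForest(forest):
--     n = len(forest)
--     m = len(forest[0])
--     burned = set()
--     frontier = []
--     for i in range(n):
--         for j in range(m):
--             if forest[i][j] == 2:
--                 burned.add((i, j))
--                 frontier.append((i, j))
--     days = 0
--     while frontier:
--         nxt = []
--         for i, j in frontier:
--             if i > 0 and forest[i-1][j] == 1 and (i-1, j) not in burned:
--                 burned.add((i-1, j)); nxt.append((i-1, j))
--             if i < n-1 and forest[i+1][j] == 1 and (i+1, j) not in burned:
--                 burned.add((i+1, j)); nxt.append((i+1, j))
--             if j > 0 and forest[i][j-1] == 1 and (i, j-1) not in burned: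
--                 burned.add((i, j-1)); nxt.append((i, j-1))
--             if j < m-1 and forest[i][j+1] == 1 and (i, j+1) not in burned:
--                 burned.add((i, j+1)); nxt.append((i, j+1))
--         if not nxt:
--             break
--         frontier = nxt
--         days += 1
--     for i, row in enumerate(forest):
--         for j, v in enumerate(row):
--             if v == 1 and (i, j) not in burned:
--                 return -1
--     return days
-- ===== Notes on version B (the rewrite author's own statement) =====
-- stated objective: faster
-- what changed: Replaces A's daily full-grid rescan (which re-examines every burning cell each day and mutates the grid) by a multi-source BFS by levels: a burned set plus a frontier of newly burning cells, so each cell is processed once; the final unburned-tree check reads the untouched input against the burned set.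
-- outside the precondition, e.g. on minDaysToBurnForest([]): A raises IndexError, B raises IndexError; on minDaysToBurnForest([[2, 1], [1]]): A raises IndexError, B raises IndexError
import Mathlib
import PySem

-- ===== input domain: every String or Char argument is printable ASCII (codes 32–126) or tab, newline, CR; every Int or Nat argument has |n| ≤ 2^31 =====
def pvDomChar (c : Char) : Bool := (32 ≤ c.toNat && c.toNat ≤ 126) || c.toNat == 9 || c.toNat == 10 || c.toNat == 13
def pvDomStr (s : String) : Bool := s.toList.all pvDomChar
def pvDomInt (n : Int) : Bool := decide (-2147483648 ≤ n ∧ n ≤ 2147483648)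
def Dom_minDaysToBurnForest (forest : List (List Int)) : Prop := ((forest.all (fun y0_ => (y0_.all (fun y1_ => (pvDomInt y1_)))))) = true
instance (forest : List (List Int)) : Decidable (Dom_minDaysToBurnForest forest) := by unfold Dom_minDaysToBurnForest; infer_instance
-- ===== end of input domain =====

-- B replaces A's daily rescan-and-mutate of the whole grid by a multi-source BFS by
-- levels (burned set + frontier of newly burning cells); A mutates `forest` in place,
-- B does not — the equivalence proved here is about the return value only.

-- ===== PORT A =====

-- forest[i][j] (indices are always in range on the admitted inputs; default never used there)
def pvCell (g : List (List Int)) (i j : Int) : Int :=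
  PySem.List.pyGetD (PySem.List.pyGetD g i []) j 0

-- the four guarded appends of A's inner loop body, in A's order
def pvCandsA (g : List (List Int)) (n m i j : Int) : List (Int × Int) :=
  if pvCell g i j = 2 then
    (if 0 < i ∧ pvCell g (i-1) j = 1 then [(i-1, j)] else []) ++
    (if i < n-1 ∧ pvCell g (i+1) j = 1 then [(i+1, j)] else []) ++
    (if 0 < j ∧ pvCell g i (j-1) = 1 then [(i, j-1)] else []) ++
    (if j < m-1 ∧ pvCell g i (j+1) = 1 then [(i, j+1)] else [])
  else []

-- the two nested 'for i in range(n): for j in range(m):' scans building new_fire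
def pvNewFire (g : List (List Int)) (n m : Int) : List (Int × Int) :=
  (PySem.List.pyRange 0 n 1).foldl (fun acc i =>
    (PySem.List.pyRange 0 m 1).foldl (fun acc j => acc ++ pvCandsA g n m i j) acc) []

-- 'for x, y in new_fire: forest[x][y] = 2'
def pvBurn (g : List (List Int)) (nf : List (Int × Int)) : List (List Int) :=
  nf.foldl (fun g c =>
    PySem.List.pySetD g c.1 (PySem.List.pySetD (PySem.List.pyGetD g c.1 []) c.2 2)) g

-- 'for row in forest: if 1 in row: return -1' then 'return days'
def pvFinishA (g : List (List Int)) (days : Int) : Int :=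
  if g.any (fun row => row.contains 1) then -1 else days

-- A's 'while True' loop; fuel n*m+1 is always enough: every continued day turns at
-- least one fresh cell from 1 to 2, so the loop runs at most n*m productive days.
def pvLoopA (n m : Int) : Nat → List (List Int) → Int → Int
  | 0, g, days => pvFinishA g days
  | fuel+1, g, days =>
    let nf := pvNewFire g n m
    if nf = [] then pvFinishA g days
    else pvLoopA n m fuel (pvBurn g nf) (days + 1)

def minDaysToBurnForest (forest : List (List Int)) : Int :=
  pvLoopA (forest.length : Int) ((forest.headD []).length : Int)
    (forest.length * (forest.headD []).length + 1) forest 0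

-- ===== PORT B =====

-- 'if cnd and d not in burned: burned.add(d); nxt.append(d)'
-- (the add happens only after the not-in test, so it is exactly an append)
def pvTry (cnd : Prop) [Decidable cnd] (d : Int × Int)
    (st : List (Int × Int) × List (Int × Int)) : List (Int × Int) × List (Int × Int) :=
  if cnd ∧ d ∉ st.1 then (st.1 ++ [d], st.2 ++ [d]) else st

-- B's loop body for one frontier cell: the four direction checks, in order
def pvStep (orig : List (List Int)) (n m : Int)
    (st : List (Int × Int) × List (Int × Int)) (c : Int × Int) :
    List (Int × Int) × List (Int × Int) :=
  let st := pvTry (0 < c.1 ∧ pvCell orig (c.1-1) c.2 = 1) (c.1-1, c.2) st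
  let st := pvTry (c.1 < n-1 ∧ pvCell orig (c.1+1) c.2 = 1) (c.1+1, c.2) st
  let st := pvTry (0 < c.2 ∧ pvCell orig c.1 (c.2-1) = 1) (c.1, c.2-1) st
  pvTry (c.2 < m-1 ∧ pvCell orig c.1 (c.2+1) = 1) (c.1, c.2+1) st

-- the initial scan collecting the burning cells (burned and frontier hold the same
-- distinct elements, so one list is built and passed for both)
def pvInit (orig : List (List Int)) (n m : Int) : List (Int × Int) :=
  (PySem.List.pyRange 0 n 1).foldl (fun acc i =>
    (PySem.List.pyRange 0 m 1).foldl (fun acc j =>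
      if pvCell orig i j = 2 then acc ++ [(i, j)] else acc) acc) []

-- B's final check: any still-green tree (value 1, never burned) ⇒ -1
def pvFinishB (orig : List (List Int)) (burned : List (Int × Int)) (days : Int) : Int :=
  if (PySem.List.enumerate orig).any (fun r =>
      (PySem.List.enumerate r.2).any (fun v => decide (v.2 = 1 ∧ (r.1, v.1) ∉ burned)))
  then -1 else days

-- B's 'while frontier' loop; same fuel bound as A's loop (each round adds a cell)
def pvLoopB (orig : List (List Int)) (n m : Int) :
    Nat → List (Int × Int) → List (Int × Int) → Int → Int
  | 0, burned, _, days => pvFinishB orig burned days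
  | fuel+1, burned, frontier, days =>
    if frontier = [] then pvFinishB orig burned days
    else
      let st := frontier.foldl (pvStep orig n m) (burned, [])
      if st.2 = [] then pvFinishB orig st.1 days
      else pvLoopB orig n m fuel st.1 st.2 (days + 1)

def minDaysToBurnForest_alt (forest : List (List Int)) : Int :=
  let init := pvInit forest (forest.length : Int) ((forest.headD []).length : Int)
  pvLoopB forest (forest.length : Int) ((forest.headD []).length : Int)
    (forest.length * (forest.headD []).length + 1) init init 0

-- ===== PRECONDITION & SPEC =====
-- Pre_ is exactly where the Python A returns: on [] it raises IndexError at forest[0],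
-- and when some row is shorter than row 0 the first full scan raises IndexError.
def Pre_minDaysToBurnForest (forest : List (List Int)) : Prop :=
  forest ≠ [] ∧ ∀ row ∈ forest, (forest.headD []).length ≤ row.length
instance (forest : List (List Int)) : Decidable (Pre_minDaysToBurnForest forest) := by
  unfold Pre_minDaysToBurnForest; infer_instance

def pvWitness_minDaysToBurnForest : List (List Int) := [[2, 1, 0], [1, 1, 1]]

def Spec_minDaysToBurnForest (forest : List (List Int)) (out : Int) : Prop := out = minDaysToBurnForest_alt forest
instance (forest : List (List Int)) (out : Int) : Decidable (Spec_minDaysToBurnForest forest out) := by unfold Spec_minDaysToBurnForest; infer_instance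

-- ===== CLAIM (what is proved, stated in full; the proofs are below) =====
def Claim_equal_minDaysToBurnForest : Prop := ∀ (forest : List (List Int)), Dom_minDaysToBurnForest forest → Pre_minDaysToBurnForest forest → Spec_minDaysToBurnForest forest (minDaysToBurnForest forest)

-- ===== LEMMAS AND PROOFS =====

-- a cell of the n×m box
def pvBox (n m : Int) (c : Int × Int) : Prop :=
  0 ≤ c.1 ∧ c.1 < n ∧ 0 ≤ c.2 ∧ c.2 < m

-- d is the neighbour of c in one of the four guarded directions
def pvAdj (n m : Int) (c d : Int × Int) : Prop :=
  (0 < c.1 ∧ d = (c.1 - 1, c.2)) ∨ (c.1 < n - 1 ∧ d = (c.1 + 1, c.2)) ∨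
  (0 < c.2 ∧ d = (c.1, c.2 - 1)) ∨ (c.2 < m - 1 ∧ d = (c.1, c.2 + 1))

def pvRowLen (g : List (List Int)) (i : Int) : Int :=
  ((PySem.List.pyGetD g i []).length : Int)

-- the bisimulation invariant between A's mutated grid and B's (burned, frontier)
def pvInv (orig : List (List Int)) (n m : Int) (g : List (List Int))
    (burned frontier : List (Int × Int)) : Prop :=
  g.length = orig.length ∧
  (∀ i : Int, 0 ≤ i → pvRowLen g i = pvRowLen orig i) ∧
  (∀ i j : Int, 0 ≤ i → 0 ≤ j → j < pvRowLen orig i →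
     pvCell g i j = if (i, j) ∈ burned then 2 else pvCell orig i j) ∧
  (∀ c ∈ burned, pvBox n m c) ∧
  (∀ i j : Int, 0 ≤ i → i < n → 0 ≤ j → j < m → pvCell orig i j = 2 → (i, j) ∈ burned) ∧
  (∀ c ∈ frontier, c ∈ burned) ∧
  (∀ c ∈ burned, c ∉ frontier →
     ∀ d, pvAdj n m c d → pvCell orig d.1 d.2 = 1 → d ∈ burned)


-- pyGetD at a nonnegative index is plain getD
lemma pv_setD_nonneg {α : Type} (xs : List α) (i : Int) (v : α) (h : 0 ≤ i) :
    PySem.List.pySetD xs i v = xs.set i.toNat v := by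
  lift i to ℕ using h with k
  simp

lemma pv_getD_nonneg {α : Type} (xs : List α) (i : Int) (d : α) (h : 0 ≤ i) :
    PySem.List.pyGetD xs i d = xs.getD i.toNat d := by
  lift i to ℕ using h with k
  simp

lemma pv_cell_eq (g : List (List Int)) (i j : Int) (hi : 0 ≤ i) (hj : 0 ≤ j) :
    pvCell g i j = (g.getD i.toNat []).getD j.toNat 0 := by
  unfold pvCell
  rw [pv_getD_nonneg _ _ _ hi, pv_getD_nonneg _ _ _ hj]

lemma pv_cell_nat (g : List (List Int)) (i j : Nat) :
    pvCell g (i : Int) (j : Int) = (g.getD i []).getD j 0 := by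
  have h := pv_cell_eq g i j (Int.natCast_nonneg i) (Int.natCast_nonneg j)
  simpa using h

lemma pv_rowLen_eq (g : List (List Int)) (i : Int) (hi : 0 ≤ i) :
    pvRowLen g i = ((g.getD i.toNat []).length : Int) := by
  unfold pvRowLen
  rw [pv_getD_nonneg _ _ _ hi]

lemma pv_getD_set {α : Type} (l : List α) (k i : Nat) (v d : α) :
    (l.set k v).getD i d = if k = i ∧ k < l.length then v else l.getD i d := by
  rw [List.getD_eq_getElem?_getD, List.getD_eq_getElem?_getD, List.getElem?_set]
  split_ifs with h1 h2 h3 <;> simp_all <;> omega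

lemma pv_getD_getElem {α : Type} (l : List α) (i : Nat) (d : α) (h : i < l.length) :
    l.getD i d = l[i] := by
  rw [List.getD_eq_getElem?_getD, List.getElem?_eq_getElem h]
  rfl

lemma pv_adj_box {n m : Int} {c d : Int × Int} (hc : pvBox n m c) (h : pvAdj n m c d) :
    pvBox n m d := by
  obtain ⟨x, y⟩ := c
  obtain ⟨hx0, hxn, hy0, hym⟩ := hc
  rcases h with ⟨h, rfl⟩ | ⟨h, rfl⟩ | ⟨h, rfl⟩ | ⟨h, rfl⟩
  · exact ⟨show (0:Int) ≤ x - 1 by omega, show x - 1 < n by omega, hy0, hym⟩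
  · exact ⟨show (0:Int) ≤ x + 1 by omega, show x + 1 < n by omega, hy0, hym⟩
  · exact ⟨hx0, hxn, show (0:Int) ≤ y - 1 by omega, show y - 1 < m by omega⟩
  · exact ⟨hx0, hxn, show (0:Int) ≤ y + 1 by omega, show y + 1 < m by omega⟩

lemma pv_mem_ite_singleton {α : Type} (P : Prop) [Decidable P] (a b : α) :
    (a ∈ if P then [b] else []) ↔ P ∧ a = b := by
  split_ifs with h <;> simp [h]

-- membership in one cell's candidate list of A's scan
lemma pv_mem_candsA (g : List (List Int)) (n m i j : Int) (d : Int × Int) :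
    d ∈ pvCandsA g n m i j ↔
      pvCell g i j = 2 ∧ pvAdj n m (i, j) d ∧ pvCell g d.1 d.2 = 1 := by
  unfold pvCandsA pvAdj
  by_cases h0 : pvCell g i j = 2
  · rw [if_pos h0]
    simp only [List.mem_append, pv_mem_ite_singleton]
    constructor
    · rintro (((⟨⟨hg, hv⟩, rfl⟩ | ⟨⟨hg, hv⟩, rfl⟩) | ⟨⟨hg, hv⟩, rfl⟩) | ⟨⟨hg, hv⟩, rfl⟩)
      · exact ⟨h0, Or.inl ⟨hg, rfl⟩, hv⟩
      · exact ⟨h0, Or.inr (Or.inl ⟨hg, rfl⟩), hv⟩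
      · exact ⟨h0, Or.inr (Or.inr (Or.inl ⟨hg, rfl⟩)), hv⟩
      · exact ⟨h0, Or.inr (Or.inr (Or.inr ⟨hg, rfl⟩)), hv⟩
    · rintro ⟨-, hadj, hv⟩
      rcases hadj with ⟨hg, rfl⟩ | ⟨hg, rfl⟩ | ⟨hg, rfl⟩ | ⟨hg, rfl⟩
      · exact Or.inl (Or.inl (Or.inl ⟨⟨hg, hv⟩, rfl⟩))
      · exact Or.inl (Or.inl (Or.inr ⟨⟨hg, hv⟩, rfl⟩))
      · exact Or.inl (Or.inr ⟨⟨hg, hv⟩, rfl⟩)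
      · exact Or.inr ⟨⟨hg, hv⟩, rfl⟩
  · rw [if_neg h0]
    constructor
    · intro hd
      simp at hd
    · rintro ⟨h2, -, -⟩
      exact absurd h2 h0

lemma pv_newFire_eq (g : List (List Int)) (n m : Int) :
    pvNewFire g n m =
      (PySem.List.pyRange 0 n 1).flatMap (fun i =>
        (PySem.List.pyRange 0 m 1).flatMap (fun j => pvCandsA g n m i j)) := by
  unfold pvNewFire
  simp only [PySem.List.foldl_append_eq_flatMap, List.nil_append]

lemma pv_mem_newFire (g : List (List Int)) (n m : Int) (d : Int × Int) :
    d ∈ pvNewFire g n m ↔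
      ∃ c, pvBox n m c ∧ pvCell g c.1 c.2 = 2 ∧ pvAdj n m c d ∧ pvCell g d.1 d.2 = 1 := by
  rw [pv_newFire_eq]
  simp only [List.mem_flatMap, PySem.List.mem_pyRange_one, pv_mem_candsA]
  constructor
  · rintro ⟨i, ⟨hi0, hin⟩, j, ⟨hj0, hjm⟩, h2, hadj, h1⟩
    exact ⟨(i, j), ⟨hi0, hin, hj0, hjm⟩, h2, hadj, h1⟩
  · rintro ⟨⟨i, j⟩, ⟨hi0, hin, hj0, hjm⟩, h2, hadj, h1⟩
    exact ⟨i, ⟨hi0, hin⟩, j, ⟨hj0, hjm⟩, h2, hadj, h1⟩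

-- one assignment forest[x][y] = 2
lemma pv_set1_len (g : List (List Int)) (cx cy : Int) :
    (PySem.List.pySetD g cx (PySem.List.pySetD (PySem.List.pyGetD g cx []) cy 2)).length
      = g.length := by
  simp [PySem.List.length_pySetD]

lemma pv_set1_rowLen (g : List (List Int)) (cx cy i : Int) (hc1 : 0 ≤ cx) (hi : 0 ≤ i) :
    pvRowLen (PySem.List.pySetD g cx (PySem.List.pySetD (PySem.List.pyGetD g cx []) cy 2)) i
      = pvRowLen g i := by
  rw [pv_rowLen_eq _ _ hi, pv_rowLen_eq _ _ hi, pv_setD_nonneg _ _ _ hc1, pv_getD_set]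
  split_ifs with h
  · rw [PySem.List.length_pySetD, pv_getD_nonneg _ _ _ hc1, h.1]
  · rfl

lemma pv_set1_cell (g : List (List Int)) (cx cy i j : Int)
    (hc1 : 0 ≤ cx) (hc2 : 0 ≤ cy) (hcl : cx < (g.length : Int))
    (hcr : cy < ((g.getD cx.toNat []).length : Int)) (hi : 0 ≤ i) (hj : 0 ≤ j) :
    pvCell (PySem.List.pySetD g cx (PySem.List.pySetD (PySem.List.pyGetD g cx []) cy 2)) i j
      = if (i, j) = (cx, cy) then 2 else pvCell g i j := by
  rw [pv_cell_eq _ _ _ hi hj, pv_setD_nonneg _ _ _ hc1,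
      pv_getD_nonneg _ _ _ hc1, pv_setD_nonneg _ _ _ hc2, pv_getD_set]
  simp only [Prod.mk.injEq]
  by_cases h1 : cx.toNat = i.toNat ∧ cx.toNat < g.length
  · rw [if_pos h1, pv_getD_set]
    by_cases h2 : cy.toNat = j.toNat ∧ cy.toNat < (g.getD cx.toNat []).length
    · rw [if_pos h2, if_pos (show i = cx ∧ j = cy by constructor <;> omega)]
    · have hne : ¬(i = cx ∧ j = cy) := by
        rintro ⟨rfl, rfl⟩
        exact h2 ⟨rfl, by omega⟩
      rw [if_neg h2, if_neg hne, pv_cell_eq _ _ _ hi hj, h1.1]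
  · have hne : ¬(i = cx ∧ j = cy) := by
      rintro ⟨rfl, rfl⟩
      exact h1 ⟨rfl, by omega⟩
    rw [if_neg h1, if_neg hne, pv_cell_eq _ _ _ hi hj]

lemma pv_burn_len (nf : List (Int × Int)) :
    ∀ g : List (List Int), (pvBurn g nf).length = g.length := by
  induction nf with
  | nil => intro g; rfl
  | cons c nf ih =>
    intro g
    show (pvBurn _ nf).length = _
    rw [ih, pv_set1_len]

lemma pv_burn_rowLen (nf : List (Int × Int)) :
    ∀ (g : List (List Int)) (i : Int), (∀ c ∈ nf, 0 ≤ c.1) → 0 ≤ i →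
      pvRowLen (pvBurn g nf) i = pvRowLen g i := by
  induction nf with
  | nil => intro g i _ _; rfl
  | cons c nf ih =>
    intro g i hb hi
    show pvRowLen (pvBurn _ nf) i = _
    rw [ih _ _ (fun e he => hb e (List.mem_cons_of_mem _ he)) hi]
    exact pv_set1_rowLen g c.1 c.2 i (hb c List.mem_cons_self) hi

lemma pv_burn_cell (nf : List (Int × Int)) :
    ∀ (g : List (List Int)) (i j : Int),
      (∀ c ∈ nf, 0 ≤ c.1 ∧ c.1 < (g.length : Int) ∧ 0 ≤ c.2 ∧ c.2 < pvRowLen g c.1) →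
      0 ≤ i → 0 ≤ j →
      pvCell (pvBurn g nf) i j = if (i, j) ∈ nf then 2 else pvCell g i j := by
  induction nf with
  | nil => intro g i j _ _ _; simp [pvBurn]
  | cons c nf ih =>
    intro g i j hb hi hj
    obtain ⟨hc1, hcl, hc2, hcr⟩ := hb c List.mem_cons_self
    rw [pv_rowLen_eq _ _ hc1] at hcr
    have hb' : ∀ e ∈ nf, 0 ≤ e.1 ∧ e.1 < ((PySem.List.pySetD g c.1
        (PySem.List.pySetD (PySem.List.pyGetD g c.1 []) c.2 2)).length : Int) ∧ 0 ≤ e.2 ∧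
        e.2 < pvRowLen (PySem.List.pySetD g c.1
          (PySem.List.pySetD (PySem.List.pyGetD g c.1 []) c.2 2)) e.1 := by
      intro e he
      obtain ⟨h1, h2, h3, h4⟩ := hb e (List.mem_cons_of_mem _ he)
      rw [pv_set1_len, pv_set1_rowLen _ _ _ _ hc1 h1]
      exact ⟨h1, h2, h3, h4⟩
    show pvCell (pvBurn _ nf) i j = _
    rw [ih _ _ _ hb' hi hj, pv_set1_cell g c.1 c.2 i j hc1 hc2 hcl hcr hi hj]
    by_cases hmem : (i, j) ∈ nf
    · simp [hmem]
    · by_cases heq : (i, j) = (c.1, c.2)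
      · simp [heq]
      · simp [hmem, heq]

-- one guarded conditional add of B
lemma pv_try_spec (P : Prop) [Decidable P] (d : Int × Int)
    (st : List (Int × Int) × List (Int × Int)) (B : List (Int × Int))
    (h : st.1 = B ++ st.2) :
    (pvTry P d st).1 = B ++ (pvTry P d st).2 ∧
    (∀ e, e ∈ (pvTry P d st).2 ↔ e ∈ st.2 ∨ (P ∧ e = d ∧ d ∉ B ∧ d ∉ st.2)) := by
  unfold pvTry
  split_ifs with hc
  · obtain ⟨hP, hd⟩ := hc
    have hdB : d ∉ B := fun hh => hd (by rw [h]; exact List.mem_append_left _ hh)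
    have hd2 : d ∉ st.2 := fun hh => hd (by rw [h]; exact List.mem_append_right _ hh)
    constructor
    · simp [h, List.append_assoc]
    · intro e
      simp only [List.mem_append, List.mem_singleton]
      constructor
      · rintro (he | rfl)
        · exact Or.inl he
        · exact Or.inr ⟨hP, rfl, hdB, hd2⟩
      · rintro (he | ⟨-, rfl, -, -⟩)
        · exact Or.inl he
        · exact Or.inr rfl
  · refine ⟨h, fun e => ?_⟩
    constructor
    · exact Or.inl
    · rintro (he | ⟨hP, rfl, hB, h2⟩)
      · exact he
      · exact absurd ⟨hP, by rw [h, List.mem_append]; tauto⟩ hc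

lemma pv_step_spec (orig : List (List Int)) (n m : Int)
    (st : List (Int × Int) × List (Int × Int)) (B : List (Int × Int)) (c : Int × Int)
    (h : st.1 = B ++ st.2) :
    (pvStep orig n m st c).1 = B ++ (pvStep orig n m st c).2 ∧
    (∀ e, e ∈ (pvStep orig n m st c).2 ↔
      e ∈ st.2 ∨ (pvAdj n m c e ∧ pvCell orig e.1 e.2 = 1 ∧ e ∉ B)) := by
  obtain ⟨h1, m1⟩ := pv_try_spec (0 < c.1 ∧ pvCell orig (c.1-1) c.2 = 1) (c.1-1, c.2) st B h
  obtain ⟨h2, m2⟩ := pv_try_spec (c.1 < n-1 ∧ pvCell orig (c.1+1) c.2 = 1) (c.1+1, c.2) _ B h1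
  obtain ⟨h3, m3⟩ := pv_try_spec (0 < c.2 ∧ pvCell orig c.1 (c.2-1) = 1) (c.1, c.2-1) _ B h2
  obtain ⟨h4, m4⟩ := pv_try_spec (c.2 < m-1 ∧ pvCell orig c.1 (c.2+1) = 1) (c.1, c.2+1) _ B h3
  refine ⟨h4, fun e => ?_⟩
  show e ∈ (pvTry (c.2 < m-1 ∧ pvCell orig c.1 (c.2+1) = 1) (c.1, c.2+1)
    (pvTry (0 < c.2 ∧ pvCell orig c.1 (c.2-1) = 1) (c.1, c.2-1)
      (pvTry (c.1 < n-1 ∧ pvCell orig (c.1+1) c.2 = 1) (c.1+1, c.2)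
        (pvTry (0 < c.1 ∧ pvCell orig (c.1-1) c.2 = 1) (c.1-1, c.2) st)))).2 ↔ _
  rw [m4 e, m3 e, m2 e, m1 e]
  constructor
  · rintro ((((he | ⟨⟨hg, hv⟩, rfl, hB, -⟩) | ⟨⟨hg, hv⟩, rfl, hB, -⟩) |
        ⟨⟨hg, hv⟩, rfl, hB, -⟩) | ⟨⟨hg, hv⟩, rfl, hB, -⟩)
    · exact Or.inl he
    · exact Or.inr ⟨Or.inl ⟨hg, rfl⟩, hv, hB⟩
    · exact Or.inr ⟨Or.inr (Or.inl ⟨hg, rfl⟩), hv, hB⟩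
    · exact Or.inr ⟨Or.inr (Or.inr (Or.inl ⟨hg, rfl⟩)), hv, hB⟩
    · exact Or.inr ⟨Or.inr (Or.inr (Or.inr ⟨hg, rfl⟩)), hv, hB⟩
  · rintro (he | ⟨hadj, hv, hB⟩)
    · exact Or.inl (Or.inl (Or.inl (Or.inl he)))
    · rcases hadj with ⟨hg, rfl⟩ | ⟨hg, rfl⟩ | ⟨hg, rfl⟩ | ⟨hg, rfl⟩
      · by_cases hs : (c.1-1, c.2) ∈ st.2
        · exact Or.inl (Or.inl (Or.inl (Or.inl hs)))
        · exact Or.inl (Or.inl (Or.inl (Or.inr ⟨⟨hg, hv⟩, rfl, hB, hs⟩)))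
      · by_cases hs : (c.1+1, c.2) ∈
            (pvTry (0 < c.1 ∧ pvCell orig (c.1-1) c.2 = 1) (c.1-1, c.2) st).2
        · rw [m1] at hs
          exact Or.inl (Or.inl (Or.inl hs))
        · exact Or.inl (Or.inl (Or.inr ⟨⟨hg, hv⟩, rfl, hB, hs⟩))
      · by_cases hs : (c.1, c.2-1) ∈
            (pvTry (c.1 < n-1 ∧ pvCell orig (c.1+1) c.2 = 1) (c.1+1, c.2)
              (pvTry (0 < c.1 ∧ pvCell orig (c.1-1) c.2 = 1) (c.1-1, c.2) st)).2
        · rw [m2, m1] at hs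
          exact Or.inl (Or.inl hs)
        · exact Or.inl (Or.inr ⟨⟨hg, hv⟩, rfl, hB, hs⟩)
      · by_cases hs : (c.1, c.2+1) ∈
            (pvTry (0 < c.2 ∧ pvCell orig c.1 (c.2-1) = 1) (c.1, c.2-1)
              (pvTry (c.1 < n-1 ∧ pvCell orig (c.1+1) c.2 = 1) (c.1+1, c.2)
                (pvTry (0 < c.1 ∧ pvCell orig (c.1-1) c.2 = 1) (c.1-1, c.2) st))).2
        · rw [m3, m2, m1] at hs
          exact Or.inl hs
        · exact Or.inr ⟨⟨hg, hv⟩, rfl, hB, hs⟩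

-- the frontier fold of B: burned grows by exactly the new frontier
lemma pv_expand_spec (orig : List (List Int)) (n m : Int) (B : List (Int × Int))
    (fr : List (Int × Int)) :
    ∀ st : List (Int × Int) × List (Int × Int), st.1 = B ++ st.2 →
    (fr.foldl (pvStep orig n m) st).1 = B ++ (fr.foldl (pvStep orig n m) st).2 ∧
    ∀ e, e ∈ (fr.foldl (pvStep orig n m) st).2 ↔
      e ∈ st.2 ∨ (pvCell orig e.1 e.2 = 1 ∧ e ∉ B ∧ ∃ c ∈ fr, pvAdj n m c e) := by
  induction fr with
  | nil =>
    intro st h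
    exact ⟨h, fun e => by simp⟩
  | cons c fr ih =>
    intro st h
    obtain ⟨h1, m1⟩ := pv_step_spec orig n m st B c h
    obtain ⟨h2, m2⟩ := ih _ h1
    refine ⟨h2, fun e => ?_⟩
    rw [List.foldl_cons, m2 e, m1 e]
    simp only [List.mem_cons]
    constructor
    · rintro ((he | ⟨hadj, hc1, hB⟩) | ⟨hc1, hB, cc, hcc, hadj⟩)
      · exact Or.inl he
      · exact Or.inr ⟨hc1, hB, c, Or.inl rfl, hadj⟩
      · exact Or.inr ⟨hc1, hB, cc, Or.inr hcc, hadj⟩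
    · rintro (he | ⟨hc1, hB, cc, (rfl | hcc), hadj⟩)
      · exact Or.inl (Or.inl he)
      · exact Or.inl (Or.inr ⟨hadj, hc1, hB⟩)
      · exact Or.inr ⟨hc1, hB, cc, hcc, hadj⟩

lemma pv_mem_init (orig : List (List Int)) (n m : Int) (d : Int × Int) :
    d ∈ pvInit orig n m ↔ pvBox n m d ∧ pvCell orig d.1 d.2 = 2 := by
  unfold pvInit
  simp only [PySem.List.foldl_append_ite, PySem.List.foldl_append_eq_flatMap,
    List.nil_append, List.mem_flatMap, List.mem_map, List.mem_filter,
    PySem.List.mem_pyRange_one, decide_eq_true_eq]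
  constructor
  · rintro ⟨i, ⟨hi0, hin⟩, j, ⟨⟨hj0, hjm⟩, h2⟩, rfl⟩
    exact ⟨⟨hi0, hin, hj0, hjm⟩, h2⟩
  · rintro ⟨⟨hi0, hin, hj0, hjm⟩, h2⟩
    exact ⟨d.1, ⟨hi0, hin⟩, d.2, ⟨⟨hj0, hjm⟩, h2⟩, rfl⟩

lemma pv_finish_eq (orig : List (List Int)) (n m : Int)
    (g : List (List Int)) (burned frontier : List (Int × Int)) (days : Int)
    (hInv : pvInv orig n m g burned frontier) :
    pvFinishA g days = pvFinishB orig burned days := by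
  obtain ⟨hL, hR, hC, -, -, -, -⟩ := hInv
  have hrow : ∀ i : Nat, (g.getD i []).length = (orig.getD i []).length := by
    intro i
    have h := hR (i : Int) (Int.natCast_nonneg i)
    rw [pv_rowLen_eq _ _ (Int.natCast_nonneg i), pv_rowLen_eq _ _ (Int.natCast_nonneg i)] at h
    simpa using h
  unfold pvFinishA pvFinishB
  have key : (g.any fun row => row.contains 1) =
      ((PySem.List.enumerate orig).any fun r =>
        (PySem.List.enumerate r.2).any fun v => decide (v.2 = 1 ∧ (r.1, v.1) ∉ burned)) := by
    rw [Bool.eq_iff_iff]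
    simp only [List.any_eq_true, PySem.List.mem_enumerate_iff, zero_add, decide_eq_true_eq]
    constructor
    · rintro ⟨row, hrowmem, hcont⟩
      obtain ⟨i, hi, rfl⟩ := List.mem_iff_getElem.1 hrowmem
      replace hcont : (1 : Int) ∈ g[i] := by simpa using hcont
      obtain ⟨j, hj, hval⟩ := List.mem_iff_getElem.1 hcont
      have hio : i < orig.length := by omega
      have hgd : g.getD i [] = g[i] := pv_getD_getElem _ _ _ hi
      have hjg : j < (g.getD i []).length := by rw [hgd]; exact hj
      have hjo : j < (orig.getD i []).length := by rw [← hrow i]; exact hjg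
      have hcg : pvCell g i j = 1 := by
        rw [pv_cell_nat, hgd, pv_getD_getElem _ _ _ hj, hval]
      have hCo := hC (i : Int) (j : Int) (Int.natCast_nonneg i) (Int.natCast_nonneg j)
        (by rw [pv_rowLen_eq _ _ (Int.natCast_nonneg i)]; simpa using hjo)
      by_cases hmem : ((i : Int), (j : Int)) ∈ burned
      · rw [if_pos hmem] at hCo
        rw [hcg] at hCo
        norm_num at hCo
      · rw [if_neg hmem] at hCo
        have ho1 : pvCell orig (i : Int) (j : Int) = 1 := by rw [← hCo]; exact hcg
        have hood : orig.getD i [] = orig[i]'hio := pv_getD_getElem _ _ _ hio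
        have hjo' : j < (orig[i]'hio).length := by rw [← hood]; exact hjo
        refine ⟨((i : Int), orig[i]'hio), ⟨i, hio, rfl⟩,
          ((j : Int), (orig[i]'hio)[j]'hjo'), ⟨j, hjo', rfl⟩, ?_, hmem⟩
        rw [pv_cell_nat, hood, pv_getD_getElem _ _ _ hjo'] at ho1
        exact ho1
    · rintro ⟨x, ⟨i, hi, rfl⟩, v, ⟨j, hj, rfl⟩, hval, hmem⟩
      have hig : i < g.length := by omega
      have hood : orig.getD i [] = orig[i]'hi := pv_getD_getElem _ _ _ hi
      have hjo : j < (orig.getD i []).length := by rw [hood]; exact hj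
      have hjg : j < (g.getD i []).length := by rw [hrow i]; exact hjo
      have hgd : g.getD i [] = g[i]'hig := pv_getD_getElem _ _ _ hig
      have ho1 : pvCell orig (i : Int) (j : Int) = 1 := by
        rw [pv_cell_nat, hood, pv_getD_getElem _ _ _ hj]
        exact hval
      have hCo := hC (i : Int) (j : Int) (Int.natCast_nonneg i) (Int.natCast_nonneg j)
        (by rw [pv_rowLen_eq _ _ (Int.natCast_nonneg i)]; simpa using hjo)
      rw [if_neg hmem] at hCo
      have hcg : pvCell g (i : Int) (j : Int) = 1 := by rw [hCo]; exact ho1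
      refine ⟨g[i]'hig, List.getElem_mem hig, ?_⟩
      have hmem1 : (1 : Int) ∈ g[i]'hig := by
        rw [pv_cell_nat, hgd] at hcg
        have := pv_getD_getElem (g[i]'hig) j 0 (by rw [← hgd]; exact hjg)
        rw [this] at hcg
        exact hcg ▸ List.getElem_mem _
      simpa using hmem1
  rw [key]

lemma pv_round (orig : List (List Int)) (n m : Int)
    (hn : n = (orig.length : Int)) (hm : ∀ i : Int, 0 ≤ i → i < n → m ≤ pvRowLen orig i)
    (g : List (List Int)) (burned frontier : List (Int × Int))
    (hInv : pvInv orig n m g burned frontier) :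
    (∀ e, e ∈ pvNewFire g n m ↔ e ∈ (frontier.foldl (pvStep orig n m) (burned, [])).2) ∧
    (frontier.foldl (pvStep orig n m) (burned, [])).1 =
      burned ++ (frontier.foldl (pvStep orig n m) (burned, [])).2 ∧
    pvInv orig n m (pvBurn g (pvNewFire g n m))
      (frontier.foldl (pvStep orig n m) (burned, [])).1
      (frontier.foldl (pvStep orig n m) (burned, [])).2 := by
  obtain ⟨hL, hR, hC, hB, hO2, hF, hCl⟩ := hInv
  obtain ⟨hst1, hmem0⟩ := pv_expand_spec orig n m burned frontier (burned, []) (by simp)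
  have hmem : ∀ e, e ∈ (frontier.foldl (pvStep orig n m) (burned, [])).2 ↔
      (pvCell orig e.1 e.2 = 1 ∧ e ∉ burned ∧ ∃ c ∈ frontier, pvAdj n m c e) := by
    intro e
    rw [hmem0 e]
    simp
  have hcell2 : ∀ c : Int × Int, pvBox n m c → (pvCell g c.1 c.2 = 2 ↔ c ∈ burned) := by
    intro c hbox
    obtain ⟨h1, h2, h3, h4⟩ := hbox
    have hco := hC c.1 c.2 h1 h3 (lt_of_lt_of_le h4 (hm c.1 h1 h2))
    constructor
    · intro h2c
      by_cases hmemb : (c.1, c.2) ∈ burned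
      · exact hmemb
      · rw [if_neg hmemb] at hco
        rw [hco] at h2c
        exact hO2 c.1 c.2 h1 h2 h3 h4 h2c
    · intro hmemb
      rw [if_pos hmemb] at hco
      exact hco
  have hcell1 : ∀ c : Int × Int, pvBox n m c →
      (pvCell g c.1 c.2 = 1 ↔ (c ∉ burned ∧ pvCell orig c.1 c.2 = 1)) := by
    intro c hbox
    obtain ⟨h1, h2, h3, h4⟩ := hbox
    have hco := hC c.1 c.2 h1 h3 (lt_of_lt_of_le h4 (hm c.1 h1 h2))
    by_cases hmemb : (c.1, c.2) ∈ burned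
    · rw [if_pos hmemb] at hco
      rw [hco]
      constructor
      · intro h; norm_num at h
      · rintro ⟨hnb, -⟩; exact absurd hmemb hnb
    · rw [if_neg hmemb] at hco
      rw [hco]
      exact ⟨fun h => ⟨hmemb, h⟩, fun h => h.2⟩
  have hnf : ∀ e, e ∈ pvNewFire g n m ↔
      (pvCell orig e.1 e.2 = 1 ∧ e ∉ burned ∧ ∃ c ∈ burned, pvAdj n m c e) := by
    intro e
    rw [pv_mem_newFire]
    constructor
    · rintro ⟨c, hbox, h2, hadj, h1⟩
      have hcb := (hcell2 c hbox).1 h2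
      have hebox := pv_adj_box hbox hadj
      obtain ⟨hnb, ho1⟩ := (hcell1 e hebox).1 h1
      exact ⟨ho1, hnb, c, hcb, hadj⟩
    · rintro ⟨ho1, hnb, c, hcb, hadj⟩
      have hbox := hB c hcb
      have hebox := pv_adj_box hbox hadj
      exact ⟨c, hbox, (hcell2 c hbox).2 hcb, hadj, (hcell1 e hebox).2 ⟨hnb, ho1⟩⟩
  have hiff : ∀ e, e ∈ pvNewFire g n m ↔
      e ∈ (frontier.foldl (pvStep orig n m) (burned, [])).2 := by
    intro e
    rw [hnf e, hmem e]
    constructor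
    · rintro ⟨ho1, hnb, c, hcb, hadj⟩
      by_cases hfr : c ∈ frontier
      · exact ⟨ho1, hnb, c, hfr, hadj⟩
      · exact absurd (hCl c hcb hfr e hadj ho1) hnb
    · rintro ⟨ho1, hnb, c, hfr, hadj⟩
      exact ⟨ho1, hnb, c, hF c hfr, hadj⟩
  have hnfbox : ∀ e ∈ pvNewFire g n m, pvBox n m e := by
    intro e he
    obtain ⟨ho1, hnb, c, hcb, hadj⟩ := (hnf e).1 he
    exact pv_adj_box (hB c hcb) hadj
  have hbounds : ∀ c ∈ pvNewFire g n m,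
      0 ≤ c.1 ∧ c.1 < ((g.length : Nat) : Int) ∧ 0 ≤ c.2 ∧ c.2 < pvRowLen g c.1 := by
    intro c hc
    obtain ⟨h1, h2, h3, h4⟩ := hnfbox c hc
    refine ⟨h1, by rw [hL, ← hn]; exact h2, h3, ?_⟩
    rw [hR c.1 h1]
    exact lt_of_lt_of_le h4 (hm c.1 h1 h2)
  refine ⟨hiff, hst1, ?_, ?_, ?_, ?_, ?_, ?_, ?_⟩
  · rw [pv_burn_len]
    exact hL
  · intro i hi
    rw [pv_burn_rowLen _ _ _ (fun c hc => (hnfbox c hc).1) hi]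
    exact hR i hi
  · intro i j hi hj hjr
    rw [pv_burn_cell _ _ _ _ hbounds hi hj, hC i j hi hj hjr]
    by_cases h1 : (i, j) ∈ pvNewFire g n m
    · rw [if_pos h1, if_pos (by rw [hst1]; exact List.mem_append_right _ ((hiff _).1 h1))]
    · rw [if_neg h1]
      by_cases h2 : (i, j) ∈ burned
      · rw [if_pos h2, if_pos (by rw [hst1]; exact List.mem_append_left _ h2)]
      · rw [if_neg h2, if_neg (by
          rw [hst1, List.mem_append]
          rintro (h | h)
          · exact h2 h
          · exact h1 ((hiff _).2 h))]
  · intro c hc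
    rw [hst1] at hc
    rcases List.mem_append.1 hc with h | h
    · exact hB c h
    · exact hnfbox c ((hiff c).2 h)
  · intro i j hi hin hj hjm h2
    rw [hst1]
    exact List.mem_append_left _ (hO2 i j hi hin hj hjm h2)
  · intro c hc
    rw [hst1]
    exact List.mem_append_right _ hc
  · intro c hc hnfr d hadj ho1
    rw [hst1] at hc
    rw [hst1]
    rcases List.mem_append.1 hc with hcb | hcs
    · by_cases hdb : d ∈ burned
      · exact List.mem_append_left _ hdb
      · by_cases hds : d ∈ (frontier.foldl (pvStep orig n m) (burned, [])).2
        · exact List.mem_append_right _ hds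
        · by_cases hcf : c ∈ frontier
          · exact absurd ((hmem d).2 ⟨ho1, hdb, c, hcf, hadj⟩) hds
          · exact absurd (hCl c hcb hcf d hadj ho1) hdb
    · exact absurd hcs hnfr

lemma pv_loop_eq (orig : List (List Int)) (n m : Int)
    (hn : n = (orig.length : Int)) (hm : ∀ i : Int, 0 ≤ i → i < n → m ≤ pvRowLen orig i) :
    ∀ (fuel : Nat) (g : List (List Int)) (burned frontier : List (Int × Int)) (days : Int),
      pvInv orig n m g burned frontier →
      pvLoopA n m fuel g days = pvLoopB orig n m fuel burned frontier days := by
  intro fuel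
  induction fuel with
  | zero => exact fun g burned frontier days hInv =>
      pv_finish_eq orig n m g burned frontier days hInv
  | succ fuel ih =>
    intro g burned frontier days hInv
    obtain ⟨hmem, hst1, hInv'⟩ := pv_round orig n m hn hm g burned frontier hInv
    show (if pvNewFire g n m = [] then pvFinishA g days
          else pvLoopA n m fuel (pvBurn g (pvNewFire g n m)) (days + 1)) = _
    by_cases hfr : frontier = []
    · subst hfr
      have hnf : pvNewFire g n m = [] := by
        rw [List.eq_nil_iff_forall_not_mem]
        intro e he
        exact absurd ((hmem e).1 he) (by simp)
      rw [if_pos hnf]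
      show _ = if ([] : List (Int × Int)) = [] then pvFinishB orig burned days else _
      rw [if_pos rfl]
      exact pv_finish_eq orig n m g burned [] days hInv
    · show _ = if frontier = [] then _ else _
      rw [if_neg hfr]
      by_cases hst2 : (frontier.foldl (pvStep orig n m) (burned, [])).2 = []
      · have hnf : pvNewFire g n m = [] := by
          rw [List.eq_nil_iff_forall_not_mem]
          intro e he
          have h := (hmem e).1 he
          rw [hst2] at h
          exact absurd h (by simp)
        rw [if_pos hnf]
        show _ = if _ = ([] : List (Int × Int)) then _ else _
        rw [if_pos hst2, hst1, hst2, List.append_nil]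
        exact pv_finish_eq orig n m g burned frontier days hInv
      · have hnf : pvNewFire g n m ≠ [] := by
          intro hcon
          apply hst2
          rw [List.eq_nil_iff_forall_not_mem]
          intro e he
          have h := (hmem e).2 he
          rw [hcon] at h
          exact absurd h (by simp)
        rw [if_neg hnf]
        show _ = if _ = ([] : List (Int × Int)) then _ else _
        rw [if_neg hst2]
        exact ih (pvBurn g (pvNewFire g n m)) _ _ (days + 1) hInv'

lemma pv_init_inv (orig : List (List Int)) (n m : Int) :
    pvInv orig n m orig (pvInit orig n m) (pvInit orig n m) := by
  refine ⟨rfl, fun i _ => rfl, ?_, ?_, ?_, fun c h => h, ?_⟩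
  · intro i j hi hj hjr
    by_cases hmem : (i, j) ∈ pvInit orig n m
    · rw [if_pos hmem]
      exact ((pv_mem_init orig n m (i, j)).1 hmem).2
    · rw [if_neg hmem]
  · exact fun c hc => ((pv_mem_init orig n m c).1 hc).1
  · intro i j hi hin hj hjm h2
    exact (pv_mem_init orig n m (i, j)).2 ⟨⟨hi, hin, hj, hjm⟩, h2⟩
  · exact fun c hc hnf => absurd hc hnf

-- ===== VERDICT (by name: the statement is the Claim_ definition above) =====
theorem minDaysToBurnForest_spec : Claim_equal_minDaysToBurnForest := by
  intro forest _hdom hpre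
  obtain ⟨hne, hrows⟩ := hpre
  show minDaysToBurnForest forest = minDaysToBurnForest_alt forest
  unfold minDaysToBurnForest minDaysToBurnForest_alt
  refine pv_loop_eq forest _ _ rfl ?_ _ forest _ _ 0 (pv_init_inv _ _ _)
  intro i hi hin
  rw [pv_rowLen_eq _ _ hi]
  have hlt : i.toNat < forest.length := by omega
  have hmemrow : forest.getD i.toNat [] ∈ forest := by
    rw [List.getD_eq_getElem?_getD, List.getElem?_eq_getElem hlt]
    exact List.getElem_mem hlt
  exact_mod_cast hrows _ hmemrow
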